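-- pv_equiv track=rewrite | github.com/grzes5003/MethamorphicCoder | analyze_r2/cmp_opcode.py | compare_opcode_sequences
-- ===== SOURCE A (Python) =====
-- from collections import defaultdict
--
-- def compare_opcode_sequences(seq_x, seq_y):
--     matches = defaultdict(list)
--
--     for i in range(len(seq_x) - 2):
--         for j in range(len(seq_y) - 2):
--             s1 = seq_x[i:i + 3]
--             s2 = seq_y[j:j + 3]
--             if set(s1) == set(s2):
--                 matches[i].append(j)
--
--     return matches
-- ===== SOURCE B (Python) =====
-- def compare_opcode_sequences(seq_x, seq_y):
--     index = {}
--     for j in range(len(seq_y) - 2):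
--         key = tuple(sorted(set(seq_y[j:j + 3])))
--         index.setdefault(key, []).append(j)
--     result = {}
--     for i in range(len(seq_x) - 2):
--         js = index.get(tuple(sorted(set(seq_x[i:i + 3]))), [])
--         if js:
--             result[i] = js
--     return result
-- ===== Notes on version B (the rewrite author's own statement) =====
-- stated objective: faster
-- what changed: Instead of comparing every 3-window of seq_x against every 3-window of seq_y, B indexes seq_y's windows once in a dict keyed by the sorted set of opcodes and answers each seq_x window by a single lookup.
import Mathlib
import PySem

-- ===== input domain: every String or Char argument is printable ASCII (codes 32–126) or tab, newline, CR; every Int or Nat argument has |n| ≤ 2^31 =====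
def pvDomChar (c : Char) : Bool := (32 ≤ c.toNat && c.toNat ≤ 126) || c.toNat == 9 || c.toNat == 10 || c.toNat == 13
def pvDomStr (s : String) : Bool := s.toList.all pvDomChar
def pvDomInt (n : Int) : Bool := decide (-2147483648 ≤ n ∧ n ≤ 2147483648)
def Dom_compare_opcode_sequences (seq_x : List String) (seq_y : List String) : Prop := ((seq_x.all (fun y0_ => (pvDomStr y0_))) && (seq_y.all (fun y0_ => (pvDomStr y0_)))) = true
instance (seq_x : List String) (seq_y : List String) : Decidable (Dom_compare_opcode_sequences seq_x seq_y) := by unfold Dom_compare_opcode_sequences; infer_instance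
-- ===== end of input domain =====

-- B replaces A's all-pairs window comparison with a one-pass index of seq_y's windows
-- keyed by their sorted opcode set, answering each seq_x window by a single lookup (faster).

-- ===== PORT A =====
def compare_opcode_sequences (seq_x : List String) (seq_y : List String) : List (Int × List Int) :=
  ((PySem.List.pyRange 0 ((seq_x.length : Int) - 2) 1).foldl (fun m i =>
      (PySem.List.pyRange 0 ((seq_y.length : Int) - 2) 1).foldl (fun m j =>
        let s1 := PySem.List.slice seq_x (some i) (some (i + 3))
        let s2 := PySem.List.slice seq_y (some j) (some (j + 3))
        if PySem.Set.equal (PySem.Set.ofList s1) (PySem.Set.ofList s2) then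
          m.modify i [] (· ++ [j])
        else m) m)
    PySem.Dict.empty).items

-- ===== PORT B =====
-- B-side helper: tuple(sorted(set(w))) — the canonical key of a 3-opcode window
def pvCanon (w : List String) : List String :=
  PySem.List.sorted (PySem.Set.ofList w) (fun x => x) false

def compare_opcode_sequences_alt (seq_x : List String) (seq_y : List String) : List (Int × List Int) :=
  let index := (PySem.List.pyRange 0 ((seq_y.length : Int) - 2) 1).foldl
      (fun d j => d.modify (pvCanon (PySem.List.slice seq_y (some j) (some (j + 3)))) [] (· ++ [j]))
      PySem.Dict.empty
  ((PySem.List.pyRange 0 ((seq_x.length : Int) - 2) 1).foldl (fun result i =>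
      let js := index.getD (pvCanon (PySem.List.slice seq_x (some i) (some (i + 3)))) []
      if js = [] then result else result.insert i js)
    PySem.Dict.empty).items

-- ===== PRECONDITION & SPEC =====
def Spec_compare_opcode_sequences (seq_x : List String) (seq_y : List String) (out : List (Int × List Int)) : Prop := out = compare_opcode_sequences_alt seq_x seq_y
instance (seq_x : List String) (seq_y : List String) (out : List (Int × List Int)) : Decidable (Spec_compare_opcode_sequences seq_x seq_y out) := by unfold Spec_compare_opcode_sequences; infer_instance

-- ===== CLAIM (what is proved, stated in full; the proofs are below) =====
def Claim_equal_compare_opcode_sequences : Prop := ∀ (seq_x : List String) (seq_y : List String), Dom_compare_opcode_sequences seq_x seq_y → Spec_compare_opcode_sequences seq_x seq_y (compare_opcode_sequences seq_x seq_y)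

-- ===== LEMMAS AND PROOFS =====

-- the j's of seq_y whose window matches seq_x's window at i (in increasing order)
def pvL (seq_x seq_y : List String) (i : Int) : List Int :=
  (PySem.List.pyRange 0 ((seq_y.length : Int) - 2) 1).filter
    (fun j => pvCanon (PySem.List.slice seq_y (some j) (some (j + 3)))
           == pvCanon (PySem.List.slice seq_x (some i) (some (i + 3))))

-- set(s1) == set(s2) is equality of the canonical keys
lemma pv_cond_eq (s1 s2 : List String) :
    PySem.Set.equal (PySem.Set.ofList s1) (PySem.Set.ofList s2)
      = (pvCanon s2 == pvCanon s1) := by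
  rw [Bool.eq_iff_iff, PySem.Set.equal_iff, beq_iff_eq, pvCanon, pvCanon,
    PySem.List.sorted_id_eq_sorted_id_iff_perm,
    List.perm_ext_iff_of_nodup (PySem.Set.nodup_ofList s2) (PySem.Set.nodup_ofList s1)]
  simp only [PySem.Set.mem_ofList]
  exact ⟨fun h a => (h a).symm, fun h a => (h a).symm⟩

-- a run of appends at one fixed key collapses to a single insert
lemma pv_modify_run (l : List Int) (hl : l ≠ []) :
    ∀ (d : PySem.Dict Int (List Int)) (i : Int),
      l.foldl (fun d j => d.modify i [] (· ++ [j])) d = d.insert i (d.getD i [] ++ l) := by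
  induction l with
  | nil => exact absurd rfl hl
  | cons j t ih =>
    intro d i
    cases t with
    | nil => simp [List.foldl, PySem.Dict.modify]
    | cons j' t' =>
      rw [List.foldl_cons, ih (by simp)]
      simp [PySem.Dict.modify, PySem.Dict.getD_insert_self, PySem.Dict.insert_insert_self]

-- A's inner loop over seq_y equals one conditional insert of the match list
lemma pv_inner_eq (seq_x seq_y : List String) (d : PySem.Dict Int (List Int)) (i : Int) :
    (PySem.List.pyRange 0 ((seq_y.length : Int) - 2) 1).foldl (fun m j =>
        if PySem.Set.equal (PySem.Set.ofList (PySem.List.slice seq_x (some i) (some (i + 3))))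
            (PySem.Set.ofList (PySem.List.slice seq_y (some j) (some (j + 3)))) then
          m.modify i [] (· ++ [j])
        else m) d
      = if pvL seq_x seq_y i = [] then d
        else d.insert i (d.getD i [] ++ pvL seq_x seq_y i) := by
  simp only [pv_cond_eq]
  rw [← List.foldl_filter (f := fun (d : PySem.Dict Int (List Int)) j => d.modify i [] (· ++ [j]))]
  by_cases h : pvL seq_x seq_y i = []
  · rw [if_pos h]
    have : ((PySem.List.pyRange 0 ((seq_y.length : Int) - 2) 1).filter
      (fun j => pvCanon (PySem.List.slice seq_y (some j) (some (j + 3)))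
             == pvCanon (PySem.List.slice seq_x (some i) (some (i + 3))))) = [] := h
    rw [this]; rfl
  · rw [if_neg h]; exact pv_modify_run _ h d i

-- B's index lookup returns exactly the match list
lemma pv_index_eq (seq_x seq_y : List String) (i : Int) :
    ((PySem.List.pyRange 0 ((seq_y.length : Int) - 2) 1).foldl
        (fun d j => d.modify (pvCanon (PySem.List.slice seq_y (some j) (some (j + 3)))) [] (· ++ [j]))
        PySem.Dict.empty).getD
      (pvCanon (PySem.List.slice seq_x (some i) (some (i + 3)))) []
      = pvL seq_x seq_y i := by
  rw [← List.foldl_map (f := fun j : Int => (pvCanon (PySem.List.slice seq_y (some j) (some (j + 3))), j))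
        (g := fun (d : PySem.Dict (List String) (List Int)) (p : List String × Int) =>
          d.modify p.1 [] (· ++ [p.2])),
      PySem.Dict.getD_foldl_modify_append]
  simp [pvL, List.filter_map, List.map_map, Function.comp_def]

-- generic outer loop: conditional inserts of fresh increasing keys append in order
lemma pv_outer (F : Int → List Int) (V : PySem.Dict Int (List Int) → Int → List Int)
    (hV : ∀ d i, d.contains i = false → V d i = F i) :
    ∀ (n : Nat) (b a : Int), (b - a).toNat = n →
      ∀ (d : PySem.Dict Int (List Int)), (∀ k ∈ d.keys, k < a) →
      ((PySem.List.pyRange a b 1).foldl (fun d i => if F i = [] then d else d.insert i (V d i)) d).items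
        = d.items ++ (PySem.List.pyRange a b 1).filterMap
            (fun i => if F i = [] then none else some (i, F i)) := by
  intro n
  induction n with
  | zero =>
    intro b a h d _
    rw [PySem.List.pyRange_one_eq_nil (by omega)]
    simp
  | succ m ih =>
    intro b a h d hk
    have hab : a < b := by omega
    rw [PySem.List.pyRange_one_cons hab]
    have hfresh : d.contains a = false := by
      by_contra hc
      have := (PySem.Dict.contains_iff_mem_keys d a).mp (by revert hc; cases d.contains a <;> simp)
      exact absurd (hk a this) (lt_irrefl a)
    by_cases hF : F a = []
    · simp only [List.foldl_cons, List.filterMap_cons, hF, reduceIte]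
      exact ih b (a + 1) (by omega) d (fun k hk' => by have := hk k hk'; omega)
    · simp only [List.foldl_cons, List.filterMap_cons, if_neg hF]
      rw [ih b (a + 1) (by omega) (d.insert a (V d a))
        (fun k hk' => by
          simp only [PySem.Dict.mem_keys_insert] at hk'
          rcases hk' with h1 | h1
          · omega
          · have := hk k h1; omega)]
      rw [PySem.Dict.items_insert_of_not_contains d (V d a) hfresh, hV d a hfresh]
      simp

-- ===== VERDICT (by name: the statement is the Claim_ definition above) =====
theorem compare_opcode_sequences_spec : Claim_equal_compare_opcode_sequences := by
  intro seq_x seq_y _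
  unfold Spec_compare_opcode_sequences
  simp only [compare_opcode_sequences, compare_opcode_sequences_alt, pv_inner_eq, pv_index_eq]
  rw [pv_outer (pvL seq_x seq_y) (fun d i => d.getD i [] ++ pvL seq_x seq_y i)
        (fun d i h => by simp only []; rw [PySem.Dict.getD_of_not_contains d [] h, List.nil_append])
        ((((seq_x.length : Int) - 2) - 0).toNat) ((seq_x.length : Int) - 2) 0 rfl
        PySem.Dict.empty (by simp [PySem.Dict.keys_empty]),
      pv_outer (pvL seq_x seq_y) (fun _ i => pvL seq_x seq_y i)
        (fun d i _ => rfl)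
        ((((seq_x.length : Int) - 2) - 0).toNat) ((seq_x.length : Int) - 2) 0 rfl
        PySem.Dict.empty (by simp [PySem.Dict.keys_empty])]
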